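-- pv_equiv track=rewrite | github.com/dmbwebb/surveycto-questionnaire | scripts/surveycto_to_txt.py | find_label_columns_for_language
-- ===== SOURCE A (Python) =====
-- def get_all_label_columns(headers):
--     """Find all label columns and return list of (index, language_name) tuples.
--
--     Returns columns in order found. The bare 'label' column gets language name
--     from its position (first language), language-specific columns use their
--     suffix (e.g. 'label:Hindi' -> 'Hindi', 'label::English' -> 'English').
--     """
--     columns = []
--     for i, header in enumerate(headers):
--         if header and str(header).lower().startswith('label'):
--             h = str(header)
--             h_lower = h.lower()
--             # Skip 'label:data' columns
--             if 'data' in h_lower: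
--                 continue
--             # Extract language name
--             if h_lower == 'label':
--                 columns.append((i, None))  # default/first language
--             elif '::' in h:
--                 lang = h.split('::', 1)[1].strip()
--                 columns.append((i, lang))
--             elif ':' in h:
--                 lang = h.split(':', 1)[1].strip()
--                 columns.append((i, lang))
--     return columns
--
-- def find_label_columns_for_language(headers, language):
--     """Find label column indices based on language selection.
--
--     Args:
--         headers: List of column headers
--         language: None for default (first column), a language name, or 'all'
--
--     Returns:
--         List of (index, language_name) tuples
--     """
--     all_cols = get_all_label_columns(headers)
--     if not all_cols:
--         return []
--
--     if language is None:
--         # Default: return just the first label column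
--         return [all_cols[0]]
--
--     if language.lower() == 'all':
--         return all_cols
--
--     # Match specific language (case-insensitive)
--     for idx, lang_name in all_cols:
--         if lang_name and lang_name.lower() == language.lower():
--             return [(idx, lang_name)]
--
--     # Also check if the bare 'label' column is the requested language
--     # (e.g., if 'label' is English and user asks for 'english')
--     # Fall back to returning nothing if no match
--     return []
-- ===== SOURCE B (Python) =====
-- def _parse_label_header(i, header):
--     """Parse one header: (index, language_name) if it is a usable label column, else None."""
--     if not header:
--         return None
--     h = str(header)
--     hl = h.lower()
--     if not hl.startswith('label') or 'data' in hl: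
--         return None
--     if hl == 'label':
--         return (i, None)
--     if '::' in h:
--         return (i, h.split('::', 1)[1].strip())
--     if ':' in h:
--         return (i, h.split(':', 1)[1].strip())
--     return None
--
-- def find_label_columns_for_language(headers, language):
--     target = None if language is None else language.lower()
--     result = []
--     for i, header in enumerate(headers):
--         col = _parse_label_header(i, header)
--         if col is None:
--             continue
--         if language is None:
--             return [col]
--         if target == 'all':
--             result.append(col)
--         elif col[1] and col[1].lower() == target:
--             return [col]
--     return result
-- ===== Notes on version B (the rewrite author's own statement) =====
-- stated objective: simpler
-- what changed: Replaces the two-pass design (build the full label-column list, then re-scan it per language mode) with a single pass over the headers guided by the language argument, returning early on the first hit for the None and specific-language modes.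
import Mathlib
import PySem

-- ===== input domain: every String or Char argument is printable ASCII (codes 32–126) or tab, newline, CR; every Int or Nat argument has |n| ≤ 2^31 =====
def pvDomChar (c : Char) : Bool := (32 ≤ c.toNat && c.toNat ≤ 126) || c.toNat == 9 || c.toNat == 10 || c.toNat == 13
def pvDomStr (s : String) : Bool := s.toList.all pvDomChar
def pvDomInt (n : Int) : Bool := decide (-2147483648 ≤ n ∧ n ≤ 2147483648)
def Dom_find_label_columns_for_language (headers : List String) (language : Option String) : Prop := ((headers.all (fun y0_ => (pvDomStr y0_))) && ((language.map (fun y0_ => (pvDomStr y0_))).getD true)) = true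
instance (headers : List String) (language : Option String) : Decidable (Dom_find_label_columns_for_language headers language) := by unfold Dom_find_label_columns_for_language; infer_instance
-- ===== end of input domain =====

-- B replaces A's two-pass design (collect all label columns, then re-scan per mode) with
-- a single pass over the headers guided by the language argument; objective: simpler.


-- ===== PORT A =====
-- h.split(sep, 1)[1]  (only used when 'sep in h', so the split has a second piece)
def pvSplitTail (h sep : String) : String :=
  (((PySem.Str.splitMax? h sep 1).getD []).getD 1 "")

def get_all_label_columns (headers : List String) : List (Int × Option String) :=
  (PySem.List.enumerate headers).foldl
    (fun columns p =>
      let i := p.1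
      let header := p.2
      if header != "" && PySem.Str.startswith (PySem.Str.lower header) "label" then
        let h := header
        let h_lower := PySem.Str.lower h
        if PySem.Str.isIn "data" h_lower then columns
        else if h_lower == "label" then columns ++ [(i, none)]
        else if PySem.Str.isIn "::" h then columns ++ [(i, some (PySem.Str.strip (pvSplitTail h "::")))]
        else if PySem.Str.isIn ":" h then columns ++ [(i, some (PySem.Str.strip (pvSplitTail h ":")))]
        else columns
      else columns)
    []

-- A's final scan: first column whose language name is truthy and matches (case-insensitive)
def pvMatchScan (cols : List (Int × Option String)) (language : String) : List (Int × Option String) :=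
  match cols with
  | [] => []
  | (idx, lang_name) :: rest =>
    if (match lang_name with
        | some s => s != "" && PySem.Str.lower s == PySem.Str.lower language
        | none => false) then [(idx, lang_name)]
    else pvMatchScan rest language

def find_label_columns_for_language (headers : List String) (language : Option String) : List (Int × Option String) :=
  let all_cols := get_all_label_columns headers
  match all_cols with
  | [] => []
  | c :: _ =>
    match language with
    | none => [c]
    | some lang =>
      if PySem.Str.lower lang == "all" then all_cols
      else pvMatchScan all_cols lang

-- ===== PORT B =====
def pvParseLabelHeader (i : Int) (header : String) : Option (Int × Option String) :=
  if header == "" then none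
  else
    let h := header
    let hl := PySem.Str.lower h
    if !(PySem.Str.startswith hl "label") || PySem.Str.isIn "data" hl then none
    else if hl == "label" then some (i, none)
    else if PySem.Str.isIn "::" h then some (i, some (PySem.Str.strip (pvSplitTail h "::")))
    else if PySem.Str.isIn ":" h then some (i, some (PySem.Str.strip (pvSplitTail h ":")))
    else none

def pvAltGo (language : Option String) (target : Option String)
    (hs : List (Int × String)) (result : List (Int × Option String)) : List (Int × Option String) :=
  match hs with
  | [] => result
  | (i, header) :: rest =>
    match pvParseLabelHeader i header with
    | none => pvAltGo language target rest result
    | some col =>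
      match language with
      | none => [col]
      | some _ =>
        if target == some "all" then pvAltGo language target rest (result ++ [col])
        else if (match col.2 with
                 | some s => s != "" && PySem.Str.lower s == target.getD ""
                 | none => false) then [col]
        else pvAltGo language target rest result

def find_label_columns_for_language_alt (headers : List String) (language : Option String) : List (Int × Option String) :=
  let target := language.map PySem.Str.lower
  pvAltGo language target (PySem.List.enumerate headers) []

-- ===== PRECONDITION & SPEC =====
def Spec_find_label_columns_for_language (headers : List String) (language : Option String) (out : List (Int × Option String)) : Prop := out = find_label_columns_for_language_alt headers language
instance (headers : List String) (language : Option String) (out : List (Int × Option String)) : Decidable (Spec_find_label_columns_for_language headers language out) := by unfold Spec_find_label_columns_for_language; infer_instance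

-- ===== CLAIM (what is proved, stated in full; the proofs are below) =====
def Claim_equal_find_label_columns_for_language : Prop := ∀ (headers : List String) (language : Option String), Dom_find_label_columns_for_language headers language → Spec_find_label_columns_for_language headers language (find_label_columns_for_language headers language)

-- ===== LEMMAS AND PROOFS =====

-- A's per-header loop body agrees with B's parse helper.
theorem pvStepA_eq (i : Int) (header : String) (cols : List (Int × Option String)) :
    (if header != "" && PySem.Str.startswith (PySem.Str.lower header) "label" then
        let h := header
        let h_lower := PySem.Str.lower h
        if PySem.Str.isIn "data" h_lower then cols
        else if h_lower == "label" then cols ++ [(i, none)]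
        else if PySem.Str.isIn "::" h then cols ++ [(i, some (PySem.Str.strip (pvSplitTail h "::")))]
        else if PySem.Str.isIn ":" h then cols ++ [(i, some (PySem.Str.strip (pvSplitTail h ":")))]
        else cols
      else cols)
      = cols ++ (pvParseLabelHeader i header).toList := by
  unfold pvParseLabelHeader
  by_cases h0 : (header == "") = true
  · simp_all
  · by_cases hs : PySem.Str.startswith (PySem.Str.lower header) "label" = true
    · by_cases hd : PySem.Str.isIn "data" (PySem.Str.lower header) = true
      · simp_all
      · by_cases hl : (PySem.Str.lower header == "label") = true
        · simp_all
          rw [if_pos (by decide), if_neg (by decide), if_neg (by decide)]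
          simp
        · by_cases h2 : PySem.Str.isIn "::" header = true
          · simp_all
          · by_cases h1 : PySem.Str.isIn ":" header = true <;> simp_all
    · simp_all

-- A's fold collects exactly the parsed columns, in order.
theorem pvFoldA_eq_filterMap (l : List (Int × String)) (cols : List (Int × Option String)) :
    l.foldl
      (fun columns p =>
        let i := p.1
        let header := p.2
        if header != "" && PySem.Str.startswith (PySem.Str.lower header) "label" then
          let h := header
          let h_lower := PySem.Str.lower h
          if PySem.Str.isIn "data" h_lower then columns
          else if h_lower == "label" then columns ++ [(i, none)]
          else if PySem.Str.isIn "::" h then columns ++ [(i, some (PySem.Str.strip (pvSplitTail h "::")))]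
          else if PySem.Str.isIn ":" h then columns ++ [(i, some (PySem.Str.strip (pvSplitTail h ":")))]
          else columns
        else columns)
      cols = cols ++ l.filterMap (fun p => pvParseLabelHeader p.1 p.2) := by
  induction l generalizing cols with
  | nil => simp
  | cons p rest ih =>
    obtain ⟨i, header⟩ := p
    simp only [List.foldl_cons, List.filterMap_cons]
    rw [ih, pvStepA_eq]
    cases pvParseLabelHeader i header <;> simp

theorem gA_eq (headers : List String) :
    get_all_label_columns headers
      = (PySem.List.enumerate headers).filterMap (fun p => pvParseLabelHeader p.1 p.2) := by
  unfold get_all_label_columns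
  exact pvFoldA_eq_filterMap _ []

-- B's pass, language = None: returns the first parsed column (as a singleton), else the accumulator.
theorem pvAltGo_none (t : Option String) (l : List (Int × String)) (res : List (Int × Option String)) :
    pvAltGo none t l res
      = match l.filterMap (fun p => pvParseLabelHeader p.1 p.2) with
        | [] => res
        | c :: _ => [c] := by
  induction l generalizing res with
  | nil => simp [pvAltGo]
  | cons p rest ih =>
    obtain ⟨i, header⟩ := p
    simp only [pvAltGo, List.filterMap_cons]
    cases pvParseLabelHeader i header with
    | none => exact ih res
    | some c => rfl

-- B's pass, 'all': appends every parsed column.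
theorem pvAltGo_all (lang : String) (h : (PySem.Str.lower lang == "all") = true)
    (l : List (Int × String)) (res : List (Int × Option String)) :
    pvAltGo (some lang) (some (PySem.Str.lower lang)) l res
      = res ++ l.filterMap (fun p => pvParseLabelHeader p.1 p.2) := by
  induction l generalizing res with
  | nil => simp [pvAltGo]
  | cons p rest ih =>
    obtain ⟨i, header⟩ := p
    simp only [pvAltGo, List.filterMap_cons]
    cases pvParseLabelHeader i header with
    | none => simp [ih]
    | some c =>
      have hall : (some (PySem.Str.lower lang) == some "all") = true := h
      simp [hall, ih]

-- B's pass, specific language: agrees with A's scan over the collected columns.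
theorem pvAltGo_specific (lang : String) (h : (PySem.Str.lower lang == "all") = false)
    (l : List (Int × String)) :
    pvAltGo (some lang) (some (PySem.Str.lower lang)) l []
      = pvMatchScan (l.filterMap (fun p => pvParseLabelHeader p.1 p.2)) lang := by
  induction l with
  | nil => simp [pvAltGo, pvMatchScan]
  | cons p rest ih =>
    obtain ⟨i, header⟩ := p
    simp only [pvAltGo, List.filterMap_cons]
    cases pvParseLabelHeader i header with
    | none => exact ih
    | some c =>
      obtain ⟨idx, lang_name⟩ := c
      have hall : (some (PySem.Str.lower lang) == some "all") = false := h
      simp only [hall, Bool.false_eq_true, if_false, pvMatchScan]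
      cases lang_name with
      | none => exact ih
      | some s =>
        simp only [Option.getD_some]
        split_ifs with hc
        · rfl
        · exact ih

-- ===== VERDICT (by name: the statement is the Claim_ definition above) =====
theorem find_label_columns_for_language_spec : Claim_equal_find_label_columns_for_language := by
  intro headers language _
  unfold Spec_find_label_columns_for_language
  unfold find_label_columns_for_language find_label_columns_for_language_alt
  rw [gA_eq]
  cases language with
  | none =>
    simp only [Option.map_none]
    rw [pvAltGo_none]
  | some lang =>
    simp only [Option.map_some]
    by_cases hall : (PySem.Str.lower lang == "all") = true
    · rw [pvAltGo_all lang hall, List.nil_append]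
      cases (PySem.List.enumerate headers).filterMap (fun p => pvParseLabelHeader p.1 p.2) with
      | nil => rfl
      | cons c tl => simp [hall]
    · have hall' := Bool.eq_false_iff.mpr hall
      rw [pvAltGo_specific lang hall']
      cases (PySem.List.enumerate headers).filterMap (fun p => pvParseLabelHeader p.1 p.2) with
      | nil => rfl
      | cons c tl => simp [hall']
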